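-- pv_equiv track=rewrite | github.com/anorbert-cmyk/AutoCognitix | scripts/download_all_obdb.py | parse_repo_name
-- ===== SOURCE A (Python) =====
-- from typing import Any, Dict, List, Optional, Set, Tuple
--
-- def parse_repo_name(name: str) -> Tuple[str, str]:
--     """
--     Parse make and model from repository name.
--
--     OBDb format: "Make-Model" (e.g., "Volkswagen-Golf", "BMW-3-Series")
--     """
--     # Handle special cases
--     special_makes = {
--         "Mercedes-Benz": "Mercedes-Benz",
--         "Alfa-Romeo": "Alfa Romeo",
--         "Land-Rover": "Land Rover",
--         "Aston-Martin": "Aston Martin",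
--         "Rolls-Royce": "Rolls-Royce",
--     }
--
--     for special, replacement in special_makes.items():
--         if name.startswith(special + "-"):
--             model = name[len(special) + 1:].replace("-", " ")
--             return replacement, model
--
--     # Standard parsing: first segment is make
--     parts = name.split("-", 1)
--     if len(parts) == 2:
--         make = parts[0].replace("_", " ")
--         model = parts[1].replace("-", " ").replace("_", " ")
--         return make, model
--
--     return name, ""
-- ===== SOURCE B (Python) =====
-- def parse_repo_name(name):
--     """Parse make and model: tokenize the name into dash-separated segments once,
--     resolve a special two-segment make by one dict lookup, and reassemble the
--     model by joining segments with spaces."""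
--     special_makes = {
--         "Mercedes-Benz": "Mercedes-Benz",
--         "Alfa-Romeo": "Alfa Romeo",
--         "Land-Rover": "Land Rover",
--         "Aston-Martin": "Aston Martin",
--         "Rolls-Royce": "Rolls-Royce",
--     }
--     segs = name.split("-")
--     if len(segs) >= 3:
--         repl = special_makes.get(segs[0] + "-" + segs[1])
--         if repl is not None:
--             return repl, " ".join(segs[2:])
--     if len(segs) == 1:
--         return name, ""
--     return segs[0].replace("_", " "), " ".join(segs[1:]).replace("_", " ")
-- ===== Notes on version B (the rewrite author's own statement) =====
-- stated objective: alternative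
-- what changed: B tokenizes the name once into dash-separated segments, resolves a special make by a single dict lookup on the first two segments, and rebuilds the model by joining the remaining segments with spaces, instead of A's per-special startswith prefix scan followed by slicing and character replacement.
import Mathlib
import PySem

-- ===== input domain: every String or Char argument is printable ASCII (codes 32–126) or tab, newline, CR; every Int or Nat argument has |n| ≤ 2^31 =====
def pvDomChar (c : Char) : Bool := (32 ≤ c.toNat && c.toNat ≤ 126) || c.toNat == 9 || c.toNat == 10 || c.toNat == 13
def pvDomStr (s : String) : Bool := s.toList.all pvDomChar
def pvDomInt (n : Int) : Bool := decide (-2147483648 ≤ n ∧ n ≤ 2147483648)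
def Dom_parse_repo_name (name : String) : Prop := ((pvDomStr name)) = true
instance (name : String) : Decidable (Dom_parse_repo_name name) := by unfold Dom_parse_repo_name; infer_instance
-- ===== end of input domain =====

-- B tokenizes the name once into dash-separated segments, resolves a special make by one dict
-- lookup on the first two segments, and reassembles the model by joining segments with spaces,
-- instead of A's per-special startswith scan plus slice/replace (objective: alternative).

-- ===== PORT A =====
def pvSpecialMakes : List (String × String) :=
  [("Mercedes-Benz", "Mercedes-Benz"), ("Alfa-Romeo", "Alfa Romeo"), ("Land-Rover", "Land Rover"),
   ("Aston-Martin", "Aston Martin"), ("Rolls-Royce", "Rolls-Royce")]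

-- the 'for special, replacement in special_makes.items()' loop with its early return
def pvSpecialScan (name : String) : List (String × String) → Option (String × String)
  | [] => none
  | (sp, repl) :: rest =>
    if PySem.Str.startswith name (sp ++ "-") then some (sp, repl) else pvSpecialScan name rest

def parse_repo_name (name : String) : String × String :=
  match pvSpecialScan name pvSpecialMakes with
  | some (sp, repl) =>
      (repl, PySem.Str.replace (PySem.Str.slice name (some (PySem.Str.len sp + 1)) none) "-" " ")
  | none =>
      let parts := (PySem.Str.splitMax? name "-" 1).getD []
      if parts.length = 2 then
        (PySem.Str.replace (parts.getD 0 "") "_" " ",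
         PySem.Str.replace (PySem.Str.replace (parts.getD 1 "") "-" " ") "_" " ")
      else (name, "")

-- ===== PORT B =====
def pvSpecialDict : PySem.Dict String String :=
  PySem.Dict.ofList
    [("Mercedes-Benz", "Mercedes-Benz"), ("Alfa-Romeo", "Alfa Romeo"), ("Land-Rover", "Land Rover"),
     ("Aston-Martin", "Aston Martin"), ("Rolls-Royce", "Rolls-Royce")]

def parse_repo_name_alt (name : String) : String × String :=
  let segs := (PySem.Str.split? name "-").getD []      -- name.split("-"); sep is non-empty
  let hit : Option String :=                            -- the 'len >= 3 and .get' guard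
    if 3 ≤ segs.length then
      PySem.Dict.get? pvSpecialDict (segs.getD 0 "" ++ "-" ++ segs.getD 1 "")
    else none
  match hit with
  | some repl => (repl, PySem.Str.join " " (PySem.List.slice segs (some 2) none))
  | none =>
    if segs.length = 1 then (name, "")
    else
      (PySem.Str.replace (segs.getD 0 "") "_" " ",
       PySem.Str.replace (PySem.Str.join " " (PySem.List.slice segs (some 1) none)) "_" " ")

-- ===== PRECONDITION & SPEC =====
def Spec_parse_repo_name (name : String) (out : String × String) : Prop := out = parse_repo_name_alt name
instance (name : String) (out : String × String) : Decidable (Spec_parse_repo_name name out) := by unfold Spec_parse_repo_name; infer_instance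

-- ===== CLAIM (what is proved, stated in full; the proofs are below) =====
def Claim_equal_parse_repo_name : Prop := ∀ (name : String), Dom_parse_repo_name name → Spec_parse_repo_name name (parse_repo_name name)

-- ===== LEMMAS AND PROOFS =====

-- substitute '-' by ' ' on a single character (abbreviates the effect of both
-- "-"→" " replace and split-then-join)
def pvF (c : Char) : Char := if c = '-' then ' ' else c

-- reference form of splitOn on the single separator '-' (pre = reversed current chunk)
def pvMS : List Char → List Char → List (List Char)
  | pre, [] => [pre.reverse]
  | pre, c :: r => if c = '-' then pre.reverse :: pvMS [] r else pvMS (c :: pre) r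

theorem pvMS_ne_nil (pre l : List Char) : pvMS pre l ≠ [] := by
  induction l generalizing pre with
  | nil => simp [pvMS]
  | cons c r ih =>
    by_cases hc : c = '-'
    · simp [pvMS, hc]
    · simp [pvMS, hc]; exact ih _

theorem pv_splitOn_go (fuel : Nat) : ∀ (l cur : List Char) (acc : List (List Char)),
    l.length + 1 ≤ fuel →
    PySem.Chars.splitOn.go ['-'] fuel l cur acc = acc.reverse ++ pvMS cur l := by
  induction fuel with
  | zero => intro l cur acc h; omega
  | succ f ih =>
    intro l cur acc h
    cases l with
    | nil => rw [PySem.Chars.splitOn.go.eq_def]; simp [pvMS]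
    | cons c r =>
      rw [PySem.Chars.splitOn.go.eq_def]
      dsimp only
      by_cases hc : c = '-'
      · subst hc
        rw [if_pos (by simp [List.isPrefixOf])]
        simp only [List.length_cons, List.length_nil, List.drop_succ_cons, List.drop_zero]
        rw [ih r [] (cur.reverse :: acc) (by simp at h; omega)]
        simp [pvMS]
      · rw [if_neg (by simp [List.isPrefixOf]; intro hh; exact absurd hh.symm hc)]
        rw [ih r (c :: cur) acc (by simp at h; omega)]
        simp [pvMS, hc]

theorem pv_splitOn_eq (s : List Char) : PySem.Chars.splitOn s ['-'] = pvMS [] s := by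
  rw [PySem.Chars.splitOn, pv_splitOn_go (s.length + 1) s [] [] (by omega)]
  simp

theorem pvMS_nodash (l : List Char) (hl : '-' ∉ l) : ∀ pre, pvMS pre l = [pre.reverse ++ l] := by
  induction l with
  | nil => intro pre; simp [pvMS]
  | cons c r ih =>
    intro pre
    have hc : c ≠ '-' := fun h => hl (h ▸ List.mem_cons_self ..)
    rw [pvMS, if_neg hc, ih (fun h => hl (List.mem_cons_of_mem _ h))]
    simp

theorem pvMS_dash (u : List Char) (hu : '-' ∉ u) : ∀ (pre t : List Char),
    pvMS pre (u ++ '-' :: t) = (pre.reverse ++ u) :: pvMS [] t := by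
  induction u with
  | nil => intro pre t; simp [pvMS]
  | cons c r ih =>
    intro pre t
    have hc : c ≠ '-' := fun h => hu (h ▸ List.mem_cons_self ..)
    rw [List.cons_append, pvMS, if_neg hc, ih (fun h => hu (List.mem_cons_of_mem _ h))]
    simp

theorem pv_join_pvMS (t : List Char) : ∀ (pre : List Char), '-' ∉ pre →
    PySem.Chars.join [' '] (pvMS pre t) = pre.reverse ++ t.map pvF := by
  induction t with
  | nil => intro pre _; simp [pvMS, PySem.Chars.join_singleton]
  | cons c r ih =>
    intro pre hpre
    by_cases hc : c = '-'
    · subst hc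
      rw [pvMS, if_pos rfl]
      rcases hr : pvMS [] r with _ | ⟨q, rest⟩
      · exact absurd hr (pvMS_ne_nil [] r)
      · rw [PySem.Chars.join_cons_cons, ← hr, ih [] (by simp)]
        simp [pvF]
    · rw [pvMS, if_neg hc, ih (c :: pre) (by simp [hpre]; exact fun h => hc h.symm)]
      simp [pvF, hc]

theorem pv_replace_go (fuel : Nat) : ∀ (l acc : List Char), l.length ≤ fuel →
    PySem.Chars.replace.go ['-'] [' '] fuel l acc = acc.reverse ++ l.map pvF := by
  induction fuel with
  | zero =>
    intro l acc h
    obtain rfl : l = [] := List.length_eq_zero_iff.mp (by omega)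
    rw [PySem.Chars.replace.go.eq_def]; simp
  | succ f ih =>
    intro l acc h
    cases l with
    | nil => rw [PySem.Chars.replace.go.eq_def]; simp
    | cons c r =>
      rw [PySem.Chars.replace.go.eq_def]
      dsimp only
      by_cases hc : c = '-'
      · subst hc
        rw [if_pos (by simp [List.isPrefixOf])]
        simp only [List.length_cons, List.length_nil, List.drop_succ_cons, List.drop_zero]
        rw [ih r _ (by simp at h; omega)]
        simp [pvF]
      · rw [if_neg (by simp [List.isPrefixOf]; intro hh; exact absurd hh.symm hc)]
        rw [ih r (c :: acc) (by simp at h; omega)]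
        simp [pvF, hc]

theorem pv_replace_dash (s : List Char) :
    PySem.Chars.replace s ['-'] [' '] = s.map pvF := by
  rw [PySem.Chars.replace]
  rw [if_neg (by simp)]
  exact pv_replace_go s.length s [] le_rfl

theorem pv_first_dash (l : List Char) (h : '-' ∈ l) :
    ∃ x t, l = x ++ '-' :: t ∧ '-' ∉ x := by
  induction l with
  | nil => cases h
  | cons c r ih =>
    by_cases hc : c = '-'
    · exact ⟨[], r, by simp [hc], by simp⟩
    · obtain ⟨x, t, hxt, hx⟩ := ih (by rcases List.mem_cons.mp h with h1 | h1; exact absurd h1.symm hc; exact h1)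
      exact ⟨c :: x, t, by simp [hxt], by simp [hx]; exact fun hh => hc hh.symm⟩

-- B's segs for a given decomposition of name
theorem pv_segs_eq (name : String) :
    (PySem.Str.split? name "-").getD [] = (pvMS [] name.toList).map String.ofList := by
  have h := PySem.Str.split?_map name "-"
  rw [PySem.Chars.split?, if_neg (by simp)] at h
  cases hs : PySem.Str.split? name "-" with
  | none => rw [hs] at h; simp at h
  | some parts =>
    rw [hs] at h
    simp only [Option.map_some, Option.some_inj] at h
    rw [show ("-" : String).toList = ['-'] from rfl, pv_splitOn_eq] at h
    simp only [Option.getD_some]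
    rw [← h, List.map_map]
    simp [Function.comp_def, String.ofList_toList]

-- splitMax? machinery for A's standard path (maxsplit = 1)
theorem pv_goZero (t cur : List Char) (acc : List (List Char)) (fuel : Nat) (hf : 1 ≤ fuel) :
    PySem.Chars.splitOnMax.go ['-'] fuel 0 t cur acc = acc.reverse ++ [cur.reverse ++ t] := by
  obtain ⟨f, rfl⟩ : ∃ f, fuel = f + 1 := ⟨fuel - 1, by omega⟩
  cases t with
  | nil => rw [PySem.Chars.splitOnMax.go.eq_def]; simp
  | cons c r => rw [PySem.Chars.splitOnMax.go.eq_def]; simp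

theorem pv_goOne_hit (x : List Char) (hx : '-' ∉ x) : ∀ (t cur : List Char) (acc : List (List Char)) (fuel : Nat),
    x.length + t.length + 2 ≤ fuel →
    PySem.Chars.splitOnMax.go ['-'] fuel 1 (x ++ '-' :: t) cur acc = acc.reverse ++ [cur.reverse ++ x, t] := by
  induction x with
  | nil =>
    intro t cur acc fuel hf
    obtain ⟨f, rfl⟩ : ∃ f, fuel = f + 1 := ⟨fuel - 1, by omega⟩
    rw [PySem.Chars.splitOnMax.go.eq_def]
    simp only [List.nil_append]
    rw [if_neg (by omega), if_pos (by simp)]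
    simp only [List.length_cons, List.length_nil, List.drop_succ_cons, List.drop_zero]
    rw [pv_goZero t [] (cur.reverse :: acc) f (by simp at hf; omega)]
    simp
  | cons c x' ih =>
    intro t cur acc fuel hf
    obtain ⟨f, rfl⟩ : ∃ f, fuel = f + 1 := ⟨fuel - 1, by omega⟩
    have hc : c ≠ '-' := fun h => hx (h ▸ List.mem_cons_self ..)
    rw [PySem.Chars.splitOnMax.go.eq_def]
    simp only [List.cons_append]
    rw [if_neg (by omega), if_neg (by simp [List.isPrefixOf]; intro h; exact absurd h.symm hc)]
    rw [ih (fun h => hx (List.mem_cons_of_mem _ h)) t (c :: cur) acc f (by simp at hf ⊢; omega)]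
    simp

theorem pv_goOne_miss (l : List Char) (hl : '-' ∉ l) : ∀ (cur : List Char) (acc : List (List Char)) (fuel : Nat),
    l.length + 1 ≤ fuel →
    PySem.Chars.splitOnMax.go ['-'] fuel 1 l cur acc = acc.reverse ++ [cur.reverse ++ l] := by
  induction l with
  | nil =>
    intro cur acc fuel hf
    obtain ⟨f, rfl⟩ : ∃ f, fuel = f + 1 := ⟨fuel - 1, by omega⟩
    rw [PySem.Chars.splitOnMax.go.eq_def]
    simp
  | cons c l' ih =>
    intro cur acc fuel hf
    obtain ⟨f, rfl⟩ : ∃ f, fuel = f + 1 := ⟨fuel - 1, by omega⟩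
    have hc : c ≠ '-' := fun h => hl (h ▸ List.mem_cons_self ..)
    rw [PySem.Chars.splitOnMax.go.eq_def]
    dsimp only
    rw [if_neg (by omega), if_neg (by simp [List.isPrefixOf]; intro h; exact absurd h.symm hc)]
    rw [ih (fun h => hl (List.mem_cons_of_mem _ h)) (c :: cur) acc f (by simp at hf ⊢; omega)]
    simp

theorem pv_splitOnMax_hit (x t : List Char) (hx : '-' ∉ x) :
    PySem.Chars.splitOnMax (x ++ '-' :: t) ['-'] 1 = [x, t] := by
  rw [PySem.Chars.splitOnMax]
  rw [if_neg (by omega)]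
  simp only [Int.toNat_one]
  rw [pv_goOne_hit x hx t [] [] _ (by simp)]
  simp

theorem pv_splitOnMax_miss (s : List Char) (hs : '-' ∉ s) :
    PySem.Chars.splitOnMax s ['-'] 1 = [s] := by
  rw [PySem.Chars.splitOnMax]
  rw [if_neg (by omega)]
  simp only [Int.toNat_one]
  rw [pv_goOne_miss s hs [] [] _ (by omega)]
  simp

theorem pv_dict_eq : pvSpecialDict = PySem.Dict.mk
    [("Mercedes-Benz", "Mercedes-Benz"), ("Alfa-Romeo", "Alfa Romeo"), ("Land-Rover", "Land Rover"),
     ("Aston-Martin", "Aston Martin"), ("Rolls-Royce", "Rolls-Royce")] := by decide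

theorem pv_get?_special (K r : String) (h : PySem.Dict.get? pvSpecialDict K = some r) :
    K = "Mercedes-Benz" ∨ K = "Alfa-Romeo" ∨ K = "Land-Rover" ∨ K = "Aston-Martin" ∨ K = "Rolls-Royce" := by
  rw [pv_dict_eq] at h
  simp only [PySem.Dict.get?_mk_cons] at h
  split_ifs at h with h1 h2 h3 h4 h5
  · exact Or.inl (eq_of_beq h1).symm
  · exact Or.inr (Or.inl (eq_of_beq h2).symm)
  · exact Or.inr (Or.inr (Or.inl (eq_of_beq h3).symm))
  · exact Or.inr (Or.inr (Or.inr (Or.inl (eq_of_beq h4).symm)))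
  · exact Or.inr (Or.inr (Or.inr (Or.inr ((eq_of_beq h5).symm))))
  · simp [PySem.Dict.get?] at h

-- special-make case: A's scan hit ⇒ B's lookup hits the same entry
set_option maxHeartbeats 1000000 in
theorem pv_hit_case (name sp repl : String) (u v : List Char)
    (hu : '-' ∉ u) (hv : '-' ∉ v) (hsp : sp.toList = u ++ '-' :: v)
    (hget : PySem.Dict.get? pvSpecialDict sp = some repl)
    (hstart : PySem.Str.startswith name (sp ++ "-") = true) :
    (repl, PySem.Str.replace (PySem.Str.slice name (some (PySem.Str.len sp + 1)) none) "-" " ")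
      = parse_repo_name_alt name := by
  have hpre : sp.toList ++ ['-'] <+: name.toList := by
    rw [PySem.Str.startswith_eq, PySem.Chars.startswith_iff, String.toList_append] at hstart
    simpa using hstart
  obtain ⟨t, ht⟩ := hpre
  have hs : name.toList = u ++ '-' :: (v ++ '-' :: t) := by
    rw [← ht, hsp]; simp
  have hsegs : (PySem.Str.split? name "-").getD []
      = String.ofList u :: String.ofList v :: (pvMS [] t).map String.ofList := by
    rw [pv_segs_eq, hs, pvMS_dash u hu, pvMS_dash v hv]
    simp
  have hkey : String.ofList u ++ "-" ++ String.ofList v = sp := by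
    apply String.toList_inj.mp
    simp [hsp]
  have hA2 : (PySem.Str.replace (PySem.Str.slice name (some (PySem.Str.len sp + 1)) none) "-" " ").toList
      = t.map pvF := by
    rw [PySem.Str.toList_replace, PySem.Str.toList_slice, PySem.Chars.slice_eq_listSlice,
        PySem.List.slice_from _ (by rw [PySem.Str.len_eq]; positivity)]
    have hlen : (PySem.Str.len sp + 1).toNat = sp.toList.length + 1 := by
      rw [PySem.Str.len_eq]; omega
    rw [hlen, show name.toList = sp.toList ++ '-' :: t by rw [← ht]; simp,
        show sp.toList.length + 1 = (sp.toList ++ ['-']).length by simp,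
        show sp.toList ++ '-' :: t = (sp.toList ++ ['-']) ++ t by simp, List.drop_left]
    rw [show ("-" : String).toList = ['-'] from rfl, show (" " : String).toList = [' '] from rfl,
        pv_replace_dash]
  have hB2 : (PySem.Str.join " "
        (PySem.List.slice (String.ofList u :: String.ofList v :: (pvMS [] t).map String.ofList)
          (some 2) none)).toList = t.map pvF := by
    rw [PySem.Str.toList_join, PySem.List.slice_from _ (by norm_num),
        show ((2:Int)).toNat = 2 from rfl]
    simp only [List.drop_succ_cons, List.drop_zero, List.map_map]
    rw [show (" " : String).toList = [' '] from rfl,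
        show (String.toList ∘ String.ofList) = id by funext l; simp, List.map_id]
    exact pv_join_pvMS t [] (by simp)
  rw [parse_repo_name_alt]
  simp only [hsegs]
  rw [if_pos (by
    have hpos := List.length_pos_of_ne_nil (pvMS_ne_nil [] t)
    simp only [List.length_cons, List.length_map]
    omega)]
  simp only [List.getD_cons_zero, List.getD_cons_succ]
  rw [hkey]
  simp only [hget]
  rw [Prod.mk.injEq]
  refine ⟨rfl, ?_⟩
  apply String.toList_inj.mp
  rw [hA2, hB2]

-- no special prefix: A's standard split path equals B's fallthrough
theorem pv_miss_case (name : String)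
    (hm : ∀ sp ∈ ["Mercedes-Benz", "Alfa-Romeo", "Land-Rover", "Aston-Martin", "Rolls-Royce"],
      PySem.Str.startswith name (sp ++ "-") = false) :
    (let parts := (PySem.Str.splitMax? name "-" 1).getD []
     if parts.length = 2 then
        (PySem.Str.replace (parts.getD 0 "") "_" " ",
         PySem.Str.replace (PySem.Str.replace (parts.getD 1 "") "-" " ") "_" " ")
     else (name, ""))
      = parse_repo_name_alt name := by
  have hsm : PySem.Str.splitMax? name "-" 1
      = some ((PySem.Chars.splitOnMax name.toList ['-'] 1).map String.ofList) := by
    rw [PySem.Str.splitMax?, PySem.Chars.splitMax?]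
    rw [if_neg (by simp)]
    rfl
  by_cases hd : '-' ∈ name.toList
  · obtain ⟨x, t, hxt, hx⟩ := pv_first_dash name.toList hd
    have hparts : (PySem.Str.splitMax? name "-" 1).getD []
        = [String.ofList x, String.ofList t] := by
      rw [hsm, hxt, pv_splitOnMax_hit _ _ hx]; rfl
    have hsegs : (PySem.Str.split? name "-").getD []
        = String.ofList x :: (pvMS [] t).map String.ofList := by
      rw [pv_segs_eq, hxt, pvMS_dash x hx]; simp
    -- B's guarded dict lookup misses: a hit would contradict hm
    have hhit : (if 3 ≤ ((PySem.Str.split? name "-").getD []).length then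
        PySem.Dict.get? pvSpecialDict
          (((PySem.Str.split? name "-").getD []).getD 0 "" ++ "-" ++ ((PySem.Str.split? name "-").getD []).getD 1 "")
        else none) = none := by
      rw [hsegs]
      by_cases h3 : 3 ≤ (String.ofList x :: (pvMS [] t).map String.ofList).length
      · rw [if_pos h3]
        have hlen2 : 2 ≤ (pvMS [] t).length := by simpa using h3
        have hdt : '-' ∈ t := by
          by_contra hnd
          rw [pvMS_nodash t hnd []] at hlen2
          simp at hlen2
        obtain ⟨v, t', hvt, hvnd⟩ := pv_first_dash t hdt
        have hsegs2 : (pvMS [] t).map String.ofList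
            = String.ofList v :: (pvMS [] t').map String.ofList := by
          rw [hvt, pvMS_dash v hvnd]; simp
        rw [hsegs2]
        simp only [List.getD_cons_zero, List.getD_cons_succ]
        cases hK : PySem.Dict.get? pvSpecialDict (String.ofList x ++ "-" ++ String.ofList v) with
        | none => rfl
        | some r =>
          exfalso
          set K := String.ofList x ++ "-" ++ String.ofList v with hKdef
          have hstartsK : PySem.Str.startswith name (K ++ "-") = true := by
            rw [PySem.Str.startswith_eq, PySem.Chars.startswith_iff]
            refine ⟨t', ?_⟩
            rw [hxt, hvt, hKdef]
            simp
          rcases pv_get?_special _ _ hK with h | h | h | h | h <;>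
            rw [h] at hstartsK
          · exact absurd hstartsK (by simpa using hm "Mercedes-Benz" (by simp))
          · exact absurd hstartsK (by simpa using hm "Alfa-Romeo" (by simp))
          · exact absurd hstartsK (by simpa using hm "Land-Rover" (by simp))
          · exact absurd hstartsK (by simpa using hm "Aston-Martin" (by simp))
          · exact absurd hstartsK (by simpa using hm "Rolls-Royce" (by simp))
      · rw [if_neg h3]
    have hB : parse_repo_name_alt name =
        (PySem.Str.replace (String.ofList x) "_" " ",
         PySem.Str.replace (PySem.Str.join " "
           (PySem.List.slice (String.ofList x :: (pvMS [] t).map String.ofList) (some 1) none)) "_" " ") := by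
      rw [parse_repo_name_alt]
      simp only [hhit]
      simp only [hsegs]
      rw [if_neg (by
        simp only [List.length_cons, List.length_map]
        have := List.length_pos_of_ne_nil (pvMS_ne_nil [] t)
        omega)]
      simp only [List.getD_cons_zero]
    rw [hB]
    simp only [hparts]
    rw [if_pos (show ([String.ofList x, String.ofList t] : List String).length = 2 by simp)]
    simp only [List.getD_cons_zero, List.getD_cons_succ]
    rw [Prod.mk.injEq]
    refine ⟨rfl, ?_⟩
    congr 1
    apply String.toList_inj.mp
    rw [PySem.Str.toList_replace, PySem.Str.toList_join]
    rw [PySem.List.slice_from _ (by norm_num), show ((1:Int)).toNat = 1 from rfl]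
    simp only [List.drop_succ_cons, List.drop_zero, List.map_map]
    rw [show ("-" : String).toList = ['-'] from rfl, show (" " : String).toList = [' '] from rfl,
        pv_replace_dash,
        show (String.toList ∘ String.ofList) = id by funext l; simp, List.map_id]
    rw [String.toList_ofList]
    have hj := pv_join_pvMS t [] (by simp)
    simp only [List.reverse_nil, List.nil_append] at hj
    exact hj.symm
  · have hparts : (PySem.Str.splitMax? name "-" 1).getD [] = [name] := by
      rw [hsm, pv_splitOnMax_miss _ hd]
      simp [String.ofList_toList]
    have hsegs : (PySem.Str.split? name "-").getD [] = [name] := by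
      rw [pv_segs_eq, pvMS_nodash _ hd []]
      simp [String.ofList_toList]
    have hB : parse_repo_name_alt name = (name, "") := by
      rw [parse_repo_name_alt]
      simp [hsegs]
    rw [hB]
    simp only [hparts]
    rw [if_neg (by simp only [List.length_cons, List.length_nil]; omega)]

-- ===== VERDICT (by name: the statement is the Claim_ definition above) =====
theorem parse_repo_name_spec : Claim_equal_parse_repo_name := by
  intro name _
  unfold Spec_parse_repo_name parse_repo_name
  rcases hscan : pvSpecialScan name pvSpecialMakes with _ | ⟨sp, repl⟩
  · simp only []
    have hm : ∀ sp ∈ ["Mercedes-Benz", "Alfa-Romeo", "Land-Rover", "Aston-Martin", "Rolls-Royce"],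
        PySem.Str.startswith name (sp ++ "-") = false := by
      intro p hp
      simp only [pvSpecialScan, pvSpecialMakes] at hscan
      split_ifs at hscan with h1 h2 h3 h4 h5
      fin_cases hp
      · simpa using h1
      · simpa using h2
      · simpa using h3
      · simpa using h4
      · simpa using h5
    exact pv_miss_case name hm
  · simp only [pvSpecialScan, pvSpecialMakes] at hscan
    split_ifs at hscan with h1 h2 h3 h4 h5 <;> injection hscan with hscan <;>
      (injection hscan with hsp hrepl) <;> subst hsp <;> subst hrepl
    · exact pv_hit_case name _ _ "Mercedes".toList "Benz".toList (by decide) (by decide) (by decide) (by decide) h1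
    · exact pv_hit_case name _ _ "Alfa".toList "Romeo".toList (by decide) (by decide) (by decide) (by decide) h2
    · exact pv_hit_case name _ _ "Land".toList "Rover".toList (by decide) (by decide) (by decide) (by decide) h3
    · exact pv_hit_case name _ _ "Aston".toList "Martin".toList (by decide) (by decide) (by decide) (by decide) h4
    · exact pv_hit_case name _ _ "Rolls".toList "Royce".toList (by decide) (by decide) (by decide) (by decide) h5
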